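-- pv_equiv track=rewrite | github.com/JosephBaegne22/ehub-router-led | faker/snake_remote.py | build_cell_to_entities
-- ===== SOURCE A (Python) =====
-- GRID_W = 32
--
-- GRID_H = 32
--
-- CELL_PIX = 4
--
-- def build_cell_to_entities(columns_128x128, W=GRID_W, H=GRID_H, cell_pix=CELL_PIX):
--     cell_to_eids = [[[] for _ in range(H)] for _ in range(W)]
--     for cx in range(W):
--         for cy in range(H):
--             eids = []
--             x0 = cx * cell_pix
--             y0 = cy * cell_pix
--             for dx in range(cell_pix):
--                 for dy in range(cell_pix):
--                     eids.append(columns_128x128[x0+dx][y0+dy])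
--             cell_to_eids[cx][cy] = eids
--     return cell_to_eids
-- ===== SOURCE B (Python) =====
-- GRID_W = 32
--
-- GRID_H = 32
--
-- CELL_PIX = 4
--
-- def build_cell_to_entities(columns_128x128, W=GRID_W, H=GRID_H, cell_pix=CELL_PIX):
--     # Scatter pass: route every pixel once to its cell, instead of gathering per cell.
--     cell_to_eids = [[[] for _ in range(H)] for _ in range(W)]
--     for x in range(W * cell_pix):
--         col = columns_128x128[x]
--         cx = x // cell_pix
--         for y in range(H * cell_pix):
--             cell_to_eids[cx][y // cell_pix].append(col[y])
--     return cell_to_eids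
-- ===== Notes on version B (the rewrite author's own statement) =====
-- stated objective: alternative
-- what changed: Replaces A's per-cell gather (4 nested loops: for each cell, collect its cell_pix*cell_pix pixels) by a single scatter pass over the pixel grid that routes each pixel columns_128x128[x][y] once to cell [x//cell_pix][y//cell_pix], visiting each element with one division instead of recomputed cell offsets.
-- outside the precondition, e.g. on build_cell_to_entities([], 1, -1, 2): A returns [[]], B raises IndexError; on build_cell_to_entities([[1], [2]], -1, -1, -1): A returns [], B raises IndexError
import Mathlib
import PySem

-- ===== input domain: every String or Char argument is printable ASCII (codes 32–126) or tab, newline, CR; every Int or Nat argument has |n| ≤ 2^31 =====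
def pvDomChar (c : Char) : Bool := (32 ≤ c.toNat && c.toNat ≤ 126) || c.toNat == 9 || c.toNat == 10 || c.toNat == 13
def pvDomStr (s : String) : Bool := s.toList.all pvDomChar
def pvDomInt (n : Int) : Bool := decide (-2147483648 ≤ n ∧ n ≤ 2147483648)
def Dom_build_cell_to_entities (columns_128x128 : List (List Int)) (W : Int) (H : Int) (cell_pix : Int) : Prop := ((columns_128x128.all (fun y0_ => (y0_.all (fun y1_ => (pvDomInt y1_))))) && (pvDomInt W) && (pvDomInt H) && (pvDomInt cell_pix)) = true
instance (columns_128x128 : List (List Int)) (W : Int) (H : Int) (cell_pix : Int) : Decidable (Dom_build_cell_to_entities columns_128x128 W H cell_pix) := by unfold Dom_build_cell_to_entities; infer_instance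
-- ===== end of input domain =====

-- B replaces A's per-cell gather (4 nested loops collecting each cell's block) by one scatter
-- pass that routes every pixel to its cell via integer division (objective: alternative).

-- ===== PORT A =====
def build_cell_to_entities (columns_128x128 : List (List Int)) (W : Int) (H : Int) (cell_pix : Int) : List (List (List Int)) :=
  let cell_to_eids := (PySem.List.pyRange 0 W 1).map (fun _ => (PySem.List.pyRange 0 H 1).map (fun _ => ([] : List Int)))
  (PySem.List.pyRange 0 W 1).foldl (fun grid cx =>
    (PySem.List.pyRange 0 H 1).foldl (fun grid cy =>
      let x0 := cx * cell_pix
      let y0 := cy * cell_pix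
      let eids := (PySem.List.pyRange 0 cell_pix 1).foldl (fun eids dx =>
        (PySem.List.pyRange 0 cell_pix 1).foldl (fun eids dy =>
          eids ++ [PySem.List.pyGetD (PySem.List.pyGetD columns_128x128 (x0 + dx) []) (y0 + dy) 0]) eids) []
      PySem.List.pySetD grid cx (PySem.List.pySetD (PySem.List.pyGetD grid cx []) cy eids)) grid) cell_to_eids

-- ===== PORT B =====
def build_cell_to_entities_alt (columns_128x128 : List (List Int)) (W : Int) (H : Int) (cell_pix : Int) : List (List (List Int)) :=
  let cell_to_eids := (PySem.List.pyRange 0 W 1).map (fun _ => (PySem.List.pyRange 0 H 1).map (fun _ => ([] : List Int)))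
  (PySem.List.pyRange 0 (W * cell_pix) 1).foldl (fun grid x =>
    let col := PySem.List.pyGetD columns_128x128 x []
    let cx := PySem.Int.floordiv x cell_pix
    (PySem.List.pyRange 0 (H * cell_pix) 1).foldl (fun grid y =>
      let cy := PySem.Int.floordiv y cell_pix
      PySem.List.pySetD grid cx (PySem.List.pySetD (PySem.List.pyGetD grid cx []) cy
        ((PySem.List.pyGetD (PySem.List.pyGetD grid cx []) cy []) ++ [PySem.List.pyGetD col y 0])) ) grid) cell_to_eids

-- ===== PRECONDITION & SPEC =====
-- Pre_ excludes exactly the inputs where one of the Pythons raises IndexError: A raises when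
-- W,H,cell_pix are all positive but the grid is narrower than W*cell_pix columns or a used column
-- is shorter than H*cell_pix; B additionally raises on negative cell_pix with negative W (its loop
-- bound W*cell_pix turns positive) when columns run out or H is negative (the empty cell grid is indexed).
def Pre_build_cell_to_entities (columns_128x128 : List (List Int)) (W : Int) (H : Int) (cell_pix : Int) : Prop :=
  (cell_pix < 0 ∧ W < 0 → 0 ≤ H ∧ W * cell_pix ≤ (columns_128x128.length : Int)) ∧
  (0 < W ∧ 0 < cell_pix → W * cell_pix ≤ (columns_128x128.length : Int) ∧
    (0 < H → ∀ row ∈ columns_128x128.take (W * cell_pix).toNat, H * cell_pix ≤ (row.length : Int)))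
instance (columns_128x128 : List (List Int)) (W : Int) (H : Int) (cell_pix : Int) : Decidable (Pre_build_cell_to_entities columns_128x128 W H cell_pix) := by unfold Pre_build_cell_to_entities; infer_instance

def pvWitness_build_cell_to_entities : List (List Int) × Int × Int × Int := ([[1, 2], [3, 4]], 2, 2, 1)

def Spec_build_cell_to_entities (columns_128x128 : List (List Int)) (W : Int) (H : Int) (cell_pix : Int) (out : List (List (List Int))) : Prop := out = build_cell_to_entities_alt columns_128x128 W H cell_pix
instance (columns_128x128 : List (List Int)) (W : Int) (H : Int) (cell_pix : Int) (out : List (List (List Int))) : Decidable (Spec_build_cell_to_entities columns_128x128 W H cell_pix out) := by unfold Spec_build_cell_to_entities; infer_instance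

-- ===== CLAIM (what is proved, stated in full; the proofs are below) =====
def Claim_equal_build_cell_to_entities : Prop := ∀ (columns_128x128 : List (List Int)) (W : Int) (H : Int) (cell_pix : Int), Dom_build_cell_to_entities columns_128x128 W H cell_pix → Pre_build_cell_to_entities columns_128x128 W H cell_pix → Spec_build_cell_to_entities columns_128x128 W H cell_pix (build_cell_to_entities columns_128x128 W H cell_pix)

-- ===== LEMMAS AND PROOFS =====

-- the common value: cell (cx,cy) holds the cell_pix×cell_pix block read in dx-major order
def pvCell (cols : List (List Int)) (c cx cy : Nat) : List Int :=
  (List.range c).flatMap (fun dx => (List.range c).map (fun dy =>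
    (cols.getD (cx * c + dx) []).getD (cy * c + dy) 0))

def pvG (cols : List (List Int)) (Wn Hn c : Nat) : List (List (List Int)) :=
  (List.range Wn).map (fun cx => (List.range Hn).map (fun cy => pvCell cols c cx cy))

lemma pvRange0 (n : Int) :
    PySem.List.pyRange 0 n 1 = (List.range n.toNat).map (fun k : Nat => (k : Int)) := by
  rcases le_or_gt 0 n with h | h
  · conv_lhs => rw [← Int.toNat_of_nonneg h]
    exact PySem.List.pyRange_zero_natCast n.toNat
  · have h0 : n.toNat = 0 := by omega
    rw [h0]
    simp only [List.range_zero, List.map_nil]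
    rw [List.eq_nil_iff_forall_not_mem]
    intro x hx
    have := (PySem.List.mem_pyRange_one.mp hx)
    omega

-- a fold over range n whose step sets exactly index i (given i < length) rewrites to a map
lemma pv_foldl_range_set {α : Type} (d : α) (f : α → Nat → α) (step : List α → Nat → List α)
    (hstep : ∀ (g : List α) (i : Nat), i < g.length → step g i = g.set i (f (g.getD i d) i)) :
    ∀ (n : Nat) (g : List α), n ≤ g.length →
      (List.range n).foldl step g = ((List.range n).map (fun i => f (g.getD i d) i)) ++ g.drop n
  | 0, g, _ => by simp
  | (n+1), g, h => by
    have hn : n < g.length := h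
    rw [List.range_succ, List.foldl_append, List.foldl_cons, List.foldl_nil,
        pv_foldl_range_set d f step hstep n g (le_of_lt hn)]
    have hPlen : ((List.range n).map (fun i => f (g.getD i d) i)).length = n := by simp
    have hlen : (((List.range n).map (fun i => f (g.getD i d) i)) ++ g.drop n).length = g.length := by
      simp; omega
    rw [hstep _ n (by rw [hlen]; exact hn)]
    have hgd : (((List.range n).map (fun i => f (g.getD i d) i)) ++ g.drop n).getD n d = g.getD n d := by
      rw [List.getD_eq_getElem?_getD, List.getElem?_append_right (by omega), hPlen,
          Nat.sub_self, List.getElem?_drop, Nat.add_zero, ← List.getD_eq_getElem?_getD]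
    rw [hgd, List.set_append, if_neg (by omega), hPlen, Nat.sub_self,
        List.drop_eq_getElem_cons hn, List.set_cons_zero]
    simp


-- a fold whose step always sets the SAME index k folds the updates inside that slot
lemma pv_fold_fixed_set {α β : Type} (d : α) (k : Nat) (u : α → β → α) (step : List α → β → List α)
    (hstep : ∀ (g : List α) (t : β), k < g.length → step g t = g.set k (u (g.getD k d) t)) :
    ∀ (L : List β) (g : List α), k < g.length →
      L.foldl step g = g.set k (L.foldl u (g.getD k d))
  | [], g, hk => by
    rw [List.foldl_nil, List.foldl_nil, List.getD_eq_getElem?_getD,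
        List.getElem?_eq_getElem hk]
    simp [List.set_getElem_self]
  | (t :: L), g, hk => by
    rw [List.foldl_cons, hstep g t hk,
        pv_fold_fixed_set d k u step hstep L _ (by simpa using hk), List.foldl_cons]
    have hset : (g.set k (u (g.getD k d) t)).getD k d = u (g.getD k d) t := by
      rw [List.getD_eq_getElem?_getD, List.getElem?_set_self hk]; rfl
    rw [hset, List.set_set]

lemma pv_range_mul : ∀ (a b : Nat),
    List.range (a * b) = (List.range a).flatMap (fun i => (List.range b).map (fun j => i * b + j))
  | 0, b => by simp
  | (a+1), b => by
    rw [Nat.succ_mul, List.range_add, pv_range_mul a b, List.range_succ, List.flatMap_append]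
    simp [Nat.add_comm]

lemma pv_self_map {α : Type} (d : α) (xs : List α) :
    (List.range xs.length).map (fun i => xs.getD i d) = xs := by
  apply List.ext_getElem (by simp)
  intro i h1 h2
  simp [List.getD_eq_getElem?_getD, List.getElem?_eq_getElem h2]

-- one scatter column: appending e y into slot y/c for y < h*c fills each of the h slots in order
lemma pv_block_append {α : Type} (c h : Nat) (e : Nat → α) (row : List (List α)) (hrow : h ≤ row.length) :
    (List.range (h * c)).foldl (fun r y => r.set (y / c) ((r.getD (y / c) []) ++ [e y])) row
    = ((List.range h).map (fun cy => row.getD cy [] ++ (List.range c).map (fun dy => e (cy * c + dy)))) ++ row.drop h := by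
  rw [pv_range_mul, List.foldl_flatMap]
  refine pv_foldl_range_set [] (fun cell cy => cell ++ (List.range c).map (fun dy => e (cy * c + dy))) _ ?_ h row hrow
  intro g cy hcy
  rw [List.foldl_map]
  rw [PySem.List.foldl_congr_mem _ _
      (fun (r : List (List α)) dy => r.set cy ((r.getD cy []) ++ [e (cy * c + dy)])) _ ?_]
  · rw [pv_fold_fixed_set [] cy (fun cell dy => cell ++ [e (cy * c + dy)]) _ (fun g t ht => rfl) _ g hcy,
        PySem.List.foldl_append_singleton_eq_map]
  · intro r dy hdy
    have hdc : dy < c := List.mem_range.mp hdy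
    have hdiv : (cy * c + dy) / c = cy := by
      rw [Nat.mul_comm, Nat.mul_add_div (by omega)]
      simp [Nat.div_eq_of_lt hdc]
    rw [hdiv]

-- repeated scatter columns accumulate per-cell blocks in traversal order
lemma pv_rowSteps {α : Type} (c h : Nat) (e : Nat → Nat → α) :
    ∀ (L : List Nat) (row : List (List α)), row.length = h →
    L.foldl (fun r x => (List.range (h * c)).foldl (fun r y => r.set (y / c) ((r.getD (y / c) []) ++ [e x y])) r) row
    = (List.range h).map (fun cy => row.getD cy [] ++ L.flatMap (fun x => (List.range c).map (fun dy => e x (cy * c + dy))))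
  | [], row, hlen => by
    simp only [List.foldl_nil, List.flatMap_nil, List.append_nil]
    rw [← hlen]
    exact (pv_self_map [] row).symm
  | (x :: L), row, hlen => by
    have hd : row.drop h = [] := by rw [← hlen]; exact List.drop_length
    rw [List.foldl_cons, pv_block_append c h (e x) row (le_of_eq hlen.symm), hd,
        List.append_nil, pv_rowSteps c h e L _ (by simp)]
    apply List.map_congr_left
    intro cy hcy
    rw [PySem.List.getD_map_range _ _ _ _ (List.mem_range.mp (by simpa [hlen] using hcy)),
        List.append_assoc, List.flatMap_cons]

-- A's gathered eids list is pvCell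
lemma pv_eids (cols : List (List Int)) (cp : Int) (cxn cyn : Nat) :
    (PySem.List.pyRange 0 cp 1).foldl (fun eids dx =>
      (PySem.List.pyRange 0 cp 1).foldl (fun eids dy =>
        eids ++ [PySem.List.pyGetD (PySem.List.pyGetD cols ((cxn : Int) * cp + dx) []) ((cyn : Int) * cp + dy) 0]) eids) []
    = pvCell cols cp.toNat cxn cyn := by
  rw [pvRange0]
  simp only [List.foldl_map, PySem.List.foldl_append_singleton_eq_map,
    PySem.List.foldl_append_eq_flatMap, List.nil_append]
  unfold pvCell
  rw [List.flatMap_def, List.flatMap_def]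
  congr 1
  apply List.map_congr_left
  intro dxn hdx
  apply List.map_congr_left
  intro dyn hdy
  have hdc : dxn < cp.toNat := List.mem_range.mp hdx
  have hcp : ((cp.toNat : Nat) : Int) = cp := Int.toNat_of_nonneg (by omega)
  have hx : (cxn : Int) * cp + (dxn : Int) = ((cxn * cp.toNat + dxn : Nat) : Int) := by
    push_cast [hcp]; ring
  have hy : (cyn : Int) * cp + (dyn : Int) = ((cyn * cp.toNat + dyn : Nat) : Int) := by
    push_cast [hcp]; ring
  rw [hx, hy, PySem.List.pyGetD_natCast, PySem.List.pyGetD_natCast]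

-- the pure-Nat form of A's double loop
lemma pv_A_nat (cols : List (List Int)) (Wn Hn cn : Nat) :
    (List.range Wn).foldl (fun g cxn =>
        (List.range Hn).foldl (fun g cyn =>
          g.set cxn ((g.getD cxn []).set cyn (pvCell cols cn cxn cyn))) g)
      ((List.range Wn).map (fun _ => (List.range Hn).map (fun _ => ([] : List Int))))
    = pvG cols Wn Hn cn := by
  rw [pv_foldl_range_set [] (fun row cxn => (List.range Hn).foldl (fun r cyn => r.set cyn (pvCell cols cn cxn cyn)) row) _ ?_ Wn _ (by simp)]
  · rw [List.drop_eq_nil_of_le (by simp), List.append_nil]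
    unfold pvG
    apply List.map_congr_left
    intro cxn hcx
    rw [PySem.List.getD_map_range _ _ _ _ (List.mem_range.mp hcx)]
    rw [pv_foldl_range_set [] (fun _ cyn => pvCell cols cn cxn cyn) _ (fun g i hi => rfl) Hn _ (by simp)]
    rw [List.drop_eq_nil_of_le (by simp), List.append_nil]
  · intro g cxn hcx
    exact pv_fold_fixed_set [] cxn (fun r cyn => r.set cyn (pvCell cols cn cxn cyn)) _
      (fun g t ht => rfl) _ g hcx

-- a fold whose every step sets an out-of-range index leaves the list unchanged
lemma pv_fold_set_oob {α β : Type} (k : Nat) (v : List α → β → α) :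
    ∀ (L : List β) (g : List α), g.length ≤ k →
      L.foldl (fun g t => g.set k (v g t)) g = g
  | [], g, _ => rfl
  | (t :: L), g, hk => by
    rw [List.foldl_cons, List.set_eq_of_length_le hk,
        pv_fold_set_oob k v L g hk]

-- B's inner y-loop, for a fixed pixel column x, rewrites to an update of row x/cn
lemma pv_B_inner (cols : List (List Int)) (cn Hn k x : Nat) (hx : x / cn = k)
    (g : List (List (List Int))) :
    (List.range (Hn * cn)).foldl (fun g yn => g.set (x / cn)
      ((g.getD (x / cn) []).set (yn / cn)
        (((g.getD (x / cn) []).getD (yn / cn) []) ++ [(cols.getD x []).getD yn 0]))) g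
    = g.set k ((List.range (Hn * cn)).foldl (fun r yn => r.set (yn / cn)
        ((r.getD (yn / cn) []) ++ [(cols.getD x []).getD yn 0])) (g.getD k [])) := by
  subst hx
  rcases Nat.lt_or_ge (x / cn) g.length with hk | hk
  · exact pv_fold_fixed_set [] (x / cn)
      (fun r yn => r.set (yn / cn) ((r.getD (yn / cn) []) ++ [(cols.getD x []).getD yn 0]))
      _ (fun g t ht => rfl) _ g hk
  · rw [pv_fold_set_oob _ _ _ g hk, List.set_eq_of_length_le hk]

-- the pure-Nat form of B's scatter loop
lemma pv_B_nat (cols : List (List Int)) (Wn Hn cn : Nat) :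
    (List.range (Wn * cn)).foldl (fun g xn =>
        (List.range (Hn * cn)).foldl (fun g yn =>
          g.set (xn / cn) ((g.getD (xn / cn) []).set (yn / cn)
            (((g.getD (xn / cn) []).getD (yn / cn) []) ++ [(cols.getD xn []).getD yn 0]))) g)
      ((List.range Wn).map (fun _ => (List.range Hn).map (fun _ => ([] : List Int))))
    = pvG cols Wn Hn cn := by
  rw [pv_range_mul Wn cn, List.foldl_flatMap]
  simp only [List.foldl_map]
  rw [pv_foldl_range_set [] (fun row cxn => (List.range cn).foldl (fun r dxn =>
        (List.range (Hn * cn)).foldl (fun r yn => r.set (yn / cn)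
          ((r.getD (yn / cn) []) ++ [(cols.getD (cxn * cn + dxn) []).getD yn 0])) r) row) _ ?_ Wn _ (by simp)]
  · rw [List.drop_eq_nil_of_le (by simp), List.append_nil]
    unfold pvG
    apply List.map_congr_left
    intro cxn hcx
    rw [PySem.List.getD_map_range _ _ _ _ (List.mem_range.mp hcx)]
    rw [show (List.range cn).foldl (fun r dxn =>
        (List.range (Hn * cn)).foldl (fun r yn => r.set (yn / cn)
          ((r.getD (yn / cn) []) ++ [(cols.getD (cxn * cn + dxn) []).getD yn 0])) r)
        ((List.range Hn).map (fun _ => ([] : List Int)))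
      = ((List.range cn).map (fun dxn => cxn * cn + dxn)).foldl (fun r x =>
        (List.range (Hn * cn)).foldl (fun r yn => r.set (yn / cn)
          ((r.getD (yn / cn) []) ++ [(cols.getD x []).getD yn 0])) r)
        ((List.range Hn).map (fun _ => ([] : List Int))) from
      (List.foldl_map (f := fun dxn => cxn * cn + dxn)
        (g := fun (r : List (List Int)) x => List.foldl (fun r yn => r.set (yn / cn)
          ((r.getD (yn / cn) []) ++ [(cols.getD x []).getD yn 0])) r (List.range (Hn * cn)))
        (l := List.range cn)
        (init := (List.range Hn).map (fun _ => ([] : List Int)))).symm]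
    rw [pv_rowSteps cn Hn (fun x y => (cols.getD x []).getD y 0) _ _ (by simp)]
    apply List.map_congr_left
    intro cyn hcy
    rw [PySem.List.getD_map_range _ _ _ _ (List.mem_range.mp hcy), List.nil_append,
        List.flatMap_map]
    rfl
  · intro g cxn hcx
    rw [PySem.List.foldl_congr_mem _ _
        (fun (g : List (List (List Int))) dxn => g.set cxn
          ((List.range (Hn * cn)).foldl (fun r yn => r.set (yn / cn)
            ((r.getD (yn / cn) []) ++ [(cols.getD (cxn * cn + dxn) []).getD yn 0])) (g.getD cxn []))) _ ?_]
    · exact pv_fold_fixed_set [] cxn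
        (fun row dxn => List.foldl (fun r yn => r.set (yn / cn)
          ((r.getD (yn / cn) []) ++ [(cols.getD (cxn * cn + dxn) []).getD yn 0])) row (List.range (Hn * cn)))
        _ (fun g t ht => rfl) _ g hcx
    · intro acc dxn hdxn
      have hdc : dxn < cn := List.mem_range.mp hdxn
      have hdiv : (cxn * cn + dxn) / cn = cxn := by
        rw [Nat.mul_comm, Nat.mul_add_div (by omega)]
        simp [Nat.div_eq_of_lt hdc]
      exact pv_B_inner cols cn Hn cxn (cxn * cn + dxn) hdiv acc

-- A's port equals the common grid, unconditionally
lemma pv_A_eq (cols : List (List Int)) (W H cp : Int) :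
    build_cell_to_entities cols W H cp = pvG cols W.toNat H.toNat cp.toNat := by
  unfold build_cell_to_entities
  rw [pvRange0 W, pvRange0 H]
  simp only [List.map_map, Function.comp_def, List.foldl_map,
    PySem.List.pySetD_natCast, PySem.List.pyGetD_natCast, pv_eids]
  exact pv_A_nat cols W.toNat H.toNat cp.toNat

-- B's port equals the common grid when both loop bounds factor through toNat
lemma pv_B_eq (cols : List (List Int)) (W H cp : Int) (hcp : 0 ≤ cp)
    (hW : (W * cp).toNat = W.toNat * cp.toNat) (hH : (H * cp).toNat = H.toNat * cp.toNat) :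
    build_cell_to_entities_alt cols W H cp = pvG cols W.toNat H.toNat cp.toNat := by
  obtain ⟨cn, rfl⟩ : ∃ cn : Nat, cp = (cn : Int) := ⟨cp.toNat, (Int.toNat_of_nonneg hcp).symm⟩
  simp only [Int.toNat_natCast] at hW hH ⊢
  unfold build_cell_to_entities_alt
  rw [pvRange0 (W * (cn : Int)), pvRange0 (H * (cn : Int)), pvRange0 W, pvRange0 H, hW, hH]
  simp only [List.map_map, Function.comp_def, List.foldl_map, PySem.Int.floordiv_natCast,
    PySem.List.pySetD_natCast, PySem.List.pyGetD_natCast]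
  exact pv_B_nat cols W.toNat H.toNat cn

-- degenerate forms: the initial all-empty grid
lemma pv_G_zero (cols : List (List Int)) (Wn Hn : Nat) :
    pvG cols Wn Hn 0 = (List.range Wn).map (fun _ => (List.range Hn).map (fun _ => ([] : List Int))) := by
  simp [pvG, pvCell]

lemma pv_B_nil (cols : List (List Int)) (W H cp : Int) (h : W * cp ≤ 0) :
    build_cell_to_entities_alt cols W H cp
    = (List.range W.toNat).map (fun _ => (List.range H.toNat).map (fun _ => ([] : List Int))) := by
  unfold build_cell_to_entities_alt
  rw [pvRange0 (W * cp), Int.toNat_eq_zero.mpr h]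
  simp [pvRange0, List.map_map, Function.comp_def]

lemma pv_B_empty (cols : List (List Int)) (W H cp : Int) (h : H * cp ≤ 0) :
    build_cell_to_entities_alt cols W H cp
    = (List.range W.toNat).map (fun _ => (List.range H.toNat).map (fun _ => ([] : List Int))) := by
  unfold build_cell_to_entities_alt
  rw [pvRange0 (H * cp), Int.toNat_eq_zero.mpr h]
  simp [pvRange0, List.map_map, Function.comp_def, List.foldl_fixed]

-- ===== VERDICT (by name: the statement is the Claim_ definition above) =====
theorem build_cell_to_entities_spec : Claim_equal_build_cell_to_entities := by
  intro cols W H cp _hdom hpre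
  obtain ⟨h1, _h2⟩ := hpre
  unfold Spec_build_cell_to_entities
  rcases le_or_gt 0 cp with hcp | hcp
  · have hW : (W * cp).toNat = W.toNat * cp.toNat := by
      rcases le_or_gt 0 W with hw | hw
      · exact Int.toNat_mul hw hcp
      · have hle : W * cp ≤ 0 := mul_nonpos_iff.mpr (Or.inr ⟨le_of_lt hw, hcp⟩)
        have h0 : W.toNat = 0 := by omega
        rw [h0, Nat.zero_mul]
        omega
    have hH : (H * cp).toNat = H.toNat * cp.toNat := by
      rcases le_or_gt 0 H with hh | hh
      · exact Int.toNat_mul hh hcp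
      · have hle : H * cp ≤ 0 := mul_nonpos_iff.mpr (Or.inr ⟨le_of_lt hh, hcp⟩)
        have h0 : H.toNat = 0 := by omega
        rw [h0, Nat.zero_mul]
        omega
    rw [pv_A_eq, pv_B_eq cols W H cp hcp hW hH]
  · have hcn : cp.toNat = 0 := by omega
    rcases le_or_gt 0 W with hw | hw
    · have hle : W * cp ≤ 0 := mul_nonpos_iff.mpr (Or.inl ⟨hw, le_of_lt hcp⟩)
      rw [pv_A_eq, pv_B_nil cols W H cp hle, hcn, pv_G_zero]
    · obtain ⟨hH0, _⟩ := h1 ⟨hcp, hw⟩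
      have hle : H * cp ≤ 0 := mul_nonpos_iff.mpr (Or.inl ⟨hH0, le_of_lt hcp⟩)
      rw [pv_A_eq, pv_B_empty cols W H cp hle, hcn, pv_G_zero]
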